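-- pv_equiv track=rewrite | github.com/flyingmat/pyfactorizer | functions.py | fix_signs
-- ===== SOURCE A (Python) =====
-- def fix_signs(inlst):
--     i = 0
--     while i < len(inlst):
--         if inlst[i] in '+-':    # first sign is detected
--             sign = -1 if inlst[i] == '-' else 1    # sign variable assigned
--             while i+1 < len(inlst) and inlst[i+1] in '+-':    # while more signs are present
--                 if inlst[i+1] == '-':    # invert the sign if a minus is detected
--                     sign *= -1
--                 del inlst[i+1]    # delete each excessive sign
--             inlst[i] = '-' if sign == -1 else '+'    # change the only sign left's value accordingly
--         i += 1    # keep checking for other signs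
--     return inlst
-- ===== SOURCE B (Python) =====
-- def fix_signs(inlst):
--     # One pass: track parity of a run of sign tokens; emit a single sign per run.
--     out = []
--     neg = None  # None = not inside a sign run; else parity (True = negative)
--     for tok in inlst:
--         if tok in '+-':
--             d = (tok == '-')
--             neg = d if neg is None else (neg != d)
--         else:
--             if neg is not None:
--                 out.append('-' if neg else '+')
--                 neg = None
--             out.append(tok)
--     if neg is not None:
--         out.append('-' if neg else '+')
--     return out
-- ===== Notes on version B (the rewrite author's own statement) =====
-- stated objective: faster
-- what changed: B replaces A's in-place while loop with repeated del (an O(n) deletion per excess sign) by a single forward pass that builds a new list and tracks the parity of each run of sign tokens.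
import Mathlib
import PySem

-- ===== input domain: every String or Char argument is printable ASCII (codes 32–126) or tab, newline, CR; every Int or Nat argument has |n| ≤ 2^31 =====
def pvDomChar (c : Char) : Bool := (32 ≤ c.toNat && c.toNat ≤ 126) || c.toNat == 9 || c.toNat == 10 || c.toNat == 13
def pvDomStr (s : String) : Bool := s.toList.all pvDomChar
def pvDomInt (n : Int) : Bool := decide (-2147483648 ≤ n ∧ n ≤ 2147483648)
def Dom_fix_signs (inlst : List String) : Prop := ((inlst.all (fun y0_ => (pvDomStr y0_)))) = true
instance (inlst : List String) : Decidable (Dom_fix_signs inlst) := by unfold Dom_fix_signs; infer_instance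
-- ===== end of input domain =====

-- B collapses each run of consecutive sign tokens in one pass, tracking parity; A deletes
-- signs in place. A mutates its argument; only the RETURN value is claimed equal.

-- ===== PORT A =====
-- Python 'tok in "+-"' is a substring test (true for "", "+", "-", "+-")
def pvIsSign (t : String) : Bool := PySem.Str.isIn t "+-"

-- inner 'while i+1 < len(inlst) and inlst[i+1] in "+-"' loop: flips sign, deletes at i+1
-- (fuel only makes the recursion structural; l.length steps always suffice, one del per step)
def fixSignsInner (fuel : Nat) (sign : Int) (l : List String) (i : Nat) : Int × List String :=
  match fuel with
  | 0 => (sign, l)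
  | fuel + 1 =>
    if h : i + 1 < l.length then
      if pvIsSign l[i+1] then
        fixSignsInner fuel (if l[i+1] = "-" then sign * -1 else sign) (l.eraseIdx (i+1)) i
      else (sign, l)
    else (sign, l)

-- body of one iteration of the outer 'while i < len(inlst)' loop
def fixSignsStep (l : List String) (i : Nat) (h : i < l.length) : List String :=
  if pvIsSign l[i] then
    let sign : Int := if l[i] = "-" then -1 else 1
    let p := fixSignsInner l.length sign l i
    p.2.set i (if p.1 = -1 then "-" else "+")
  else l

-- outer 'while i < len(inlst)' loop (fuel = number of remaining iterations, structural)
def fixSignsOuter (fuel : Nat) (l : List String) (i : Nat) : List String :=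
  match fuel with
  | 0 => l
  | fuel + 1 =>
    if h : i < l.length then fixSignsOuter fuel (fixSignsStep l i h) (i + 1) else l

def fix_signs (inlst : List String) : List String := fixSignsOuter inlst.length inlst 0

-- ===== PORT B =====
def pvSgn (neg : Bool) : String := if neg then "-" else "+"

-- one pass over the tokens; 'neg' is None/parity exactly as in Source B's loop
def fixSignsGo (neg : Option Bool) : List String → List String
  | [] => match neg with | none => [] | some n => [pvSgn n]
  | t :: ts =>
      if pvIsSign t then
        fixSignsGo (some (match neg with | none => (t = "-") | some n => n != (t = "-"))) ts
      else
        (match neg with | none => [] | some n => [pvSgn n]) ++ t :: fixSignsGo none ts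

def fix_signs_alt (inlst : List String) : List String := fixSignsGo none inlst

-- ===== PRECONDITION & SPEC =====
def Spec_fix_signs (inlst : List String) (out : List String) : Prop := out = fix_signs_alt inlst
instance (inlst : List String) (out : List String) : Decidable (Spec_fix_signs inlst out) := by unfold Spec_fix_signs; infer_instance

-- ===== CLAIM (what is proved, stated in full; the proofs are below) =====
def Claim_equal_fix_signs : Prop := ∀ (inlst : List String), Dom_fix_signs inlst → Spec_fix_signs inlst (fix_signs inlst)

-- ===== LEMMAS AND PROOFS =====

-- functional description of the inner loop: consume the leading sign run, flipping sign
def pvEat (sign : Int) : List String → Int × List String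
  | [] => (sign, [])
  | u :: us => if pvIsSign u then pvEat (if u = "-" then sign * -1 else sign) us else (sign, u :: us)

theorem pvEat_length_le (sign : Int) (ts : List String) : (pvEat sign ts).2.length ≤ ts.length := by
  induction ts generalizing sign with
  | nil => simp [pvEat]
  | cons u us ih =>
    simp only [pvEat]
    split
    · exact le_trans (ih _) (by simp)
    · simp

theorem fixSignsInner_eq (ts : List String) : ∀ (fuel : Nat), ts.length ≤ fuel →
    ∀ (sign : Int) (pre : List String) (t : String),
    fixSignsInner fuel sign (pre ++ t :: ts) pre.length =
      ((pvEat sign ts).1, pre ++ t :: (pvEat sign ts).2) := by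
  induction ts with
  | nil =>
    intro fuel _ sign pre t
    cases fuel with
    | zero => simp [fixSignsInner, pvEat]
    | succ fuel =>
      have hno : ¬ (pre.length + 1 < (pre ++ [t]).length) := by
        simp only [List.length_append, List.length_cons, List.length_nil]; omega
      simp [fixSignsInner, hno, pvEat]
  | cons u us ih =>
    intro fuel hf sign pre t
    cases fuel with
    | zero => simp at hf
    | succ fuel =>
      have hlen : pre.length + 1 < (pre ++ t :: u :: us).length := by
        simp only [List.length_append, List.length_cons]; omega
      have hget : (pre ++ t :: u :: us)[pre.length + 1]'hlen = u := by
        rw [List.getElem_append_right (by omega)]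
        simp
      have herase : (pre ++ t :: u :: us).eraseIdx (pre.length + 1) = pre ++ t :: us := by
        rw [List.eraseIdx_append_of_length_le (by omega)]
        simp [List.eraseIdx]
      simp only [fixSignsInner, hlen, dite_true, hget, herase]
      split
      · rename_i hs
        rw [ih fuel (by simp only [List.length_cons] at hf; omega)]
        simp [pvEat, hs]
      · rename_i hs
        simp [pvEat, hs]

def pvSignOf (n : Bool) : Int := if n then -1 else 1
def pvSgnStr (s : Int) : String := if s = -1 then "-" else "+"

theorem pvSgnStr_signOf (n : Bool) : pvSgnStr (pvSignOf n) = pvSgn n := by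
  cases n <;> decide

theorem pvSignOf_decide (t : String) : (if t = "-" then (-1 : Int) else 1) = pvSignOf (decide (t = "-")) := by
  by_cases h : t = "-" <;> simp [h, pvSignOf]

theorem pvSignOf_flip (n : Bool) (u : String) :
    (if u = "-" then pvSignOf n * -1 else pvSignOf n) = pvSignOf (n != (u = "-")) := by
  by_cases h : u = "-" <;> cases n <;> simp [h, pvSignOf]

theorem fixSignsGo_some (ts : List String) : ∀ (n : Bool),
    fixSignsGo (some n) ts =
      pvSgnStr (pvEat (pvSignOf n) ts).1 :: fixSignsGo none (pvEat (pvSignOf n) ts).2 := by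
  induction ts with
  | nil =>
    intro n
    simp [fixSignsGo, pvEat, pvSgnStr_signOf]
  | cons u us ih =>
    intro n
    by_cases hs : pvIsSign u
    · simp only [fixSignsGo, pvEat, hs, if_true]
      rw [ih, pvSignOf_flip]
    · simp only [fixSignsGo, pvEat, hs, if_false, Bool.false_eq_true]
      simp [pvSgnStr_signOf]

theorem fixSignsOuter_eq (m : Nat) : ∀ (rest : List String), rest.length ≤ m →
    ∀ (pre : List String) (fuel : Nat), rest.length ≤ fuel →
    fixSignsOuter fuel (pre ++ rest) pre.length = pre ++ fixSignsGo none rest := by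
  induction m with
  | zero =>
    intro rest hm pre fuel _
    have : rest = [] := List.eq_nil_of_length_eq_zero (by omega)
    subst this
    cases fuel <;> simp [fixSignsOuter, fixSignsGo]
  | succ m ih =>
    intro rest hm pre fuel hfuel
    cases rest with
    | nil => cases fuel <;> simp [fixSignsOuter, fixSignsGo]
    | cons t ts =>
      cases fuel with
      | zero => simp at hfuel
      | succ fuel =>
        have hlen : pre.length < (pre ++ t :: ts).length := by simp
        simp only [fixSignsOuter, hlen, dite_true]
        unfold fixSignsStep
        have hget : (pre ++ t :: ts)[pre.length]'hlen = t := by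
          rw [List.getElem_append_right (by omega)]
          simp
        simp only [hget]
        by_cases hs : pvIsSign t
        · rw [if_pos hs, pvSignOf_decide,
            fixSignsInner_eq ts (pre ++ t :: ts).length
              (by simp only [List.length_append, List.length_cons]; omega)]
          set p := pvEat (pvSignOf (decide (t = "-"))) ts with hp
          have hset : (pre ++ t :: p.2).set pre.length (if p.1 = -1 then "-" else "+")
              = (pre ++ [if p.1 = -1 then "-" else "+"]) ++ p.2 := by
            rw [List.set_append_right _ _ (by omega)]
            simp
          simp only [hset]
          have h1 : pre.length + 1 = (pre ++ [if p.1 = -1 then "-" else "+"]).length := by simp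
          have hple : p.2.length ≤ ts.length := by
            rw [hp]; exact pvEat_length_le _ _
          simp only [List.length_cons] at hm hfuel
          rw [h1, ih p.2 (by omega) _ fuel (by omega)]
          simp only [fixSignsGo, hs, if_true]
          rw [fixSignsGo_some]
          simp [pvSgnStr, ← hp]
        · rw [if_neg hs]
          have h1 : pre ++ t :: ts = (pre ++ [t]) ++ ts := by simp
          have h2 : pre.length + 1 = (pre ++ [t]).length := by simp
          simp only [List.length_cons] at hm hfuel
          rw [h1, h2, ih ts (by omega) _ fuel (by omega)]
          simp [fixSignsGo, hs]

-- ===== VERDICT (by name: the statement is the Claim_ definition above) =====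
theorem fix_signs_spec : Claim_equal_fix_signs := by
  intro inlst _
  show fix_signs inlst = fix_signs_alt inlst
  have := fixSignsOuter_eq inlst.length inlst (le_refl _) [] inlst.length (le_refl _)
  simpa [fix_signs, fix_signs_alt] using this
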